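-- pv_equiv track=rewrite | github.com/queirozfcom/auto-tagger | social-tags/src/helpers/labels.py | truncate_labels
-- ===== SOURCE A (Python) =====
-- def truncate_labels(labels, min_doc_count):
--     """
--     labels is an array of label sets.
--
--     remove labels that occur in less than min_doc_count documents
--
--     :param labels: list of lists
--     :param min_doc_count: integer
--     :return:
--     """
--
--     if min_doc_count == 0:
--         return labels
--
--     label_index = dict()
--
--     for label_row in labels:
--
--         for label in label_row:
--             if label_index.get(label) is None:
--                 label_index[label] = 1
--             else:
--                 label_index[label] = label_index[label] + 1
--
--     good_labels = []
--
--     for label, doc_count in label_index.items():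
--         if doc_count >= min_doc_count:
--             good_labels.append(label)
--
--     new_labels = []
--
--     for label_row in labels:
--         new_labels.append([label for label in label_row if label in good_labels])
--
--     return new_labels
-- ===== SOURCE B (Python) =====
-- def truncate_labels(labels, min_doc_count):
--     if min_doc_count == 0:
--         return labels
--     flat = sorted(l for row in labels for l in row)
--     frequent = set()
--     run_label = None
--     run_len = 0
--     for l in flat:
--         if l == run_label:
--             run_len += 1
--         else:
--             if run_label is not None and run_len >= min_doc_count:
--                 frequent.add(run_label)
--             run_label = l
--             run_len = 1
--     if run_label is not None and run_len >= min_doc_count: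
--         frequent.add(run_label)
--     return [[l for l in row if l in frequent] for row in labels]
-- ===== Notes on version B (the rewrite author's own statement) =====
-- stated objective: alternative
-- what changed: B replaces A's hash-table counting and good_labels membership scan with a sort-based algorithm: it sorts the flattened label occurrences, sweeps once over the sorted list measuring run lengths to collect the frequent labels into a set, then filters each row by set membership.
import Mathlib
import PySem

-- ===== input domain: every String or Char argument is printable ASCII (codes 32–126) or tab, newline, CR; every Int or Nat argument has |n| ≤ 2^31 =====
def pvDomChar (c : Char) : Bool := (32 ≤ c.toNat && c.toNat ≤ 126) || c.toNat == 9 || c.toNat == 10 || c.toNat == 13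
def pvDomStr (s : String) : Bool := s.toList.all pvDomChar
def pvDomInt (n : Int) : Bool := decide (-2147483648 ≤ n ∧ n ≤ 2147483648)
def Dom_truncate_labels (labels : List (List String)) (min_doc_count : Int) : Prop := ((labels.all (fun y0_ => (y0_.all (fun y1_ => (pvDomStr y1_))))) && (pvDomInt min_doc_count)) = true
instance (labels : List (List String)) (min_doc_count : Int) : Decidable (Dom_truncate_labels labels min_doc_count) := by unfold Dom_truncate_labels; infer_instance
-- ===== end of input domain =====

-- B replaces A's dict-count + good_labels membership scan with sort-then-sweep: sort the
-- flattened occurrences, scan runs to collect frequent labels into a set, filter rows by it.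

-- ===== PORT A =====
def truncate_labels (labels : List (List String)) (min_doc_count : Int) : List (List String) :=
  if min_doc_count = 0 then labels
  else
    let label_index : PySem.Dict String Int :=
      labels.foldl (fun d label_row =>
        label_row.foldl (fun d label =>
          match d.get? label with
          | none => d.insert label 1
          | some v => d.insert label (v + 1)) d) PySem.Dict.empty
    let good_labels : List String :=
      label_index.items.foldl (fun acc p =>
        if min_doc_count ≤ p.2 then acc ++ [p.1] else acc) []
    labels.foldl (fun new_labels label_row =>
      new_labels ++ [label_row.filter (fun label => good_labels.contains label)]) []

-- ===== PORT B =====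
-- the body of B's for-loop over the sorted flat list (state: run_label, run_len, frequent)
def pvStep (min_doc_count : Int) (st : Option String × Int × PySem.Set String)
    (l : String) : Option String × Int × PySem.Set String :=
  match st with
  | (run_label, run_len, frequent) =>
    if some l = run_label then (run_label, run_len + 1, frequent)
    else
      match run_label with
      | some rl =>
          if min_doc_count ≤ run_len then (some l, 1, PySem.Set.add frequent rl)
          else (some l, 1, frequent)
      | none => (some l, 1, frequent)

-- B's trailing "if run_label is not None and run_len >= min_doc_count: frequent.add(run_label)"
def pvFinish (min_doc_count : Int) (st : Option String × Int × PySem.Set String) :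
    PySem.Set String :=
  match st with
  | (some rl, run_len, frequent) =>
      if min_doc_count ≤ run_len then PySem.Set.add frequent rl else frequent
  | (none, _, frequent) => frequent

def truncate_labels_alt (labels : List (List String)) (min_doc_count : Int) : List (List String) :=
  if min_doc_count = 0 then labels
  else
    let flat := PySem.List.sorted (labels.flatMap (fun row => row)) (fun x => x) false
    let frequent := pvFinish min_doc_count
      (flat.foldl (pvStep min_doc_count) (none, 0, PySem.Set.empty))
    labels.map (fun row => row.filter (fun l => PySem.Set.contains frequent l))

-- ===== PRECONDITION & SPEC =====
def Spec_truncate_labels (labels : List (List String)) (min_doc_count : Int) (out : List (List String)) : Prop := out = truncate_labels_alt labels min_doc_count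
instance (labels : List (List String)) (min_doc_count : Int) (out : List (List String)) : Decidable (Spec_truncate_labels labels min_doc_count out) := by unfold Spec_truncate_labels; infer_instance

-- ===== CLAIM (what is proved, stated in full; the proofs are below) =====
def Claim_equal_truncate_labels : Prop := ∀ (labels : List (List String)) (min_doc_count : Int), Dom_truncate_labels labels min_doc_count → Spec_truncate_labels labels min_doc_count (truncate_labels labels min_doc_count)

-- ===== LEMMAS AND PROOFS =====

-- A's per-label dict update is exactly "insert label (getD label 0 + 1)"
theorem pv_step_eq :
    (fun (d : PySem.Dict String Int) (label : String) =>
      match d.get? label with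
      | none => d.insert label 1
      | some v => d.insert label (v + 1)) =
    (fun (d : PySem.Dict String Int) (label : String) =>
      d.insert label (d.getD label 0 + 1)) := by
  funext d label
  cases hg : d.get? label with
  | none => simp [PySem.Dict.getD_eq_get?_getD, hg]
  | some v => simp [PySem.Dict.getD_eq_get?_getD, hg]

-- A's nested counting loop is Counter(flattened labels)
theorem pv_dict_eq (labels : List (List String)) :
    labels.foldl (fun d row =>
      row.foldl (fun d label => d.insert label (d.getD label 0 + 1)) d) PySem.Dict.empty
    = PySem.Dict.counter labels.flatten := by
  rw [← List.foldl_flatten, PySem.Dict.foldl_insert_getD_add_one_eq_counter]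

-- membership in A's good_labels, for a label that actually occurs
theorem pv_good_mem (flat : List String) (m : Int) (label : String) (hl : label ∈ flat) :
    (((PySem.Dict.counter flat).items.foldl (fun acc p =>
        if m ≤ p.2 then acc ++ [p.1] else acc) []).contains label)
    = decide (m ≤ ((flat.count label : Int))) := by
  have hfn : (fun (acc : List String) (p : String × Int) =>
        if m ≤ p.2 then acc ++ [p.1] else acc) =
      (fun acc p => if (fun q : String × Int => decide (m ≤ q.2)) p = true
        then acc ++ [p.1] else acc) := by
    funext acc p; simp
  rw [hfn, PySem.List.foldl_append_if, PySem.Dict.items_counter]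
  rw [Bool.eq_iff_iff]
  simp only [List.contains_iff_mem, List.mem_map, List.mem_filter, decide_eq_true_eq,
    List.nil_append]
  simp only [Prod.exists, Prod.mk.injEq, PySem.Set.mem_ofList]
  constructor
  · rintro ⟨a, b, ⟨⟨a1, _, rfl, rfl⟩, hm⟩, rfl⟩
    exact hm
  · intro hm
    exact ⟨label, (flat.count label : Int), ⟨⟨label, hl, rfl, rfl⟩, hm⟩, rfl⟩

-- invariant of B's run-length sweep over a sorted tail xs, starting mid-run on label a
theorem pv_sweep_inv (m : Int) (xs : List String) (hs : xs.Pairwise (· ≤ ·))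
    (a : String) (k : Int) (S : PySem.Set String) (ha : ∀ x ∈ xs, a ≤ x) (t : String) :
    (t ∈ pvFinish m (xs.foldl (pvStep m) (some a, k, S))) ↔
      t ∈ S ∨ (t = a ∧ m ≤ k + (xs.count a : Int)) ∨
        (t ∈ xs ∧ t ≠ a ∧ m ≤ (xs.count t : Int)) := by
  induction xs generalizing a k S with
  | nil =>
      simp only [List.foldl_nil, pvFinish, List.count_nil]
      split_ifs with h
      · simp only [PySem.Set.mem_add]
        constructor
        · rintro (h1 | rfl)
          · exact Or.inl h1
          · exact Or.inr (Or.inl ⟨rfl, by omega⟩)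
        · rintro (h1 | ⟨rfl, _⟩ | ⟨h2, _, _⟩)
          · exact Or.inl h1
          · exact Or.inr rfl
          · simp at h2
      · constructor
        · intro h1; exact Or.inl h1
        · rintro (h1 | ⟨rfl, hm⟩ | ⟨h2, _, _⟩)
          · exact h1
          · omega
          · simp at h2
  | cons x xs ih =>
      have hxle : ∀ y ∈ xs, x ≤ y := fun y hy => List.rel_of_pairwise_cons hs hy
      have hs' : xs.Pairwise (· ≤ ·) := hs.of_cons
      by_cases hxa : x = a
      · subst hxa
        have hst : pvStep m (some x, k, S) x = (some x, k + 1, S) := by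
          simp [pvStep]
        rw [List.foldl_cons, hst, ih hs' x (k + 1) S hxle]
        simp only [List.count_cons_self]
        constructor
        · rintro (h1 | ⟨rfl, hm⟩ | ⟨h2, hne, hm⟩)
          · exact Or.inl h1
          · exact Or.inr (Or.inl ⟨rfl, by push_cast at hm ⊢; omega⟩)
          · refine Or.inr (Or.inr ⟨List.mem_cons_of_mem _ h2, hne, ?_⟩)
            rw [List.count_cons_of_ne (Ne.symm hne)]; exact hm
        · rintro (h1 | ⟨rfl, hm⟩ | ⟨h2, hne, hm⟩)
          · exact Or.inl h1
          · exact Or.inr (Or.inl ⟨rfl, by push_cast at hm ⊢; omega⟩)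
          · rcases List.mem_cons.1 h2 with rfl | h2'
            · exact absurd rfl hne
            · refine Or.inr (Or.inr ⟨h2', hne, ?_⟩)
              rw [List.count_cons_of_ne (Ne.symm hne)] at hm; exact hm
      · have hax : a ≤ x := ha x List.mem_cons_self
        have haxlt : a < x := lt_of_le_of_ne hax (fun h => hxa h.symm)
        have hanotin : a ∉ xs := fun hmem => absurd (hxle a hmem) (not_le.2 haxlt)
        have hcnt0 : xs.count a = 0 := List.count_eq_zero.2 hanotin
        have hcnt0' : (x :: xs).count a = 0 := by
          rw [List.count_cons_of_ne hxa]; exact hcnt0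
        have hst : pvStep m (some a, k, S) x =
            if m ≤ k then (some x, 1, PySem.Set.add S a) else (some x, 1, S) := by
          simp only [pvStep]
          rw [if_neg (fun h => hxa (Option.some.inj h))]
        rw [List.foldl_cons, hst]
        have key : ∀ S' : PySem.Set String,
            (t ∈ pvFinish m (xs.foldl (pvStep m) (some x, 1, S'))) ↔
              t ∈ S' ∨ (t = x ∧ m ≤ 1 + (xs.count x : Int)) ∨
                (t ∈ xs ∧ t ≠ x ∧ m ≤ (xs.count t : Int)) := fun S' =>
          ih hs' x 1 S' hxle
        by_cases hk : m ≤ k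
        · rw [if_pos hk, key]
          simp only [PySem.Set.mem_add]
          constructor
          · rintro ((h1 | rfl) | ⟨rfl, hm⟩ | ⟨h2, hne, hm⟩)
            · exact Or.inl h1
            · exact Or.inr (Or.inl ⟨rfl, by rw [hcnt0']; push_cast; omega⟩)
            · refine Or.inr (Or.inr ⟨List.mem_cons_self, hxa, ?_⟩)
              rw [List.count_cons_self]; push_cast at hm ⊢; omega
            · have htna : t ≠ a := fun h => hanotin (h ▸ h2)
              refine Or.inr (Or.inr ⟨List.mem_cons_of_mem _ h2, htna, ?_⟩)
              rw [List.count_cons_of_ne (Ne.symm hne)]; exact hm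
          · rintro (h1 | ⟨rfl, hm⟩ | ⟨h2, hne, hm⟩)
            · exact Or.inl (Or.inl h1)
            · exact Or.inl (Or.inr rfl)
            · rcases List.mem_cons.1 h2 with rfl | h2'
              · refine Or.inr (Or.inl ⟨rfl, ?_⟩)
                rw [List.count_cons_self] at hm; push_cast at hm ⊢; omega
              · by_cases htx : t = x
                · subst htx
                  refine Or.inr (Or.inl ⟨rfl, ?_⟩)
                  rw [List.count_cons_self] at hm; push_cast at hm ⊢; omega
                · refine Or.inr (Or.inr ⟨h2', htx, ?_⟩)
                  rw [List.count_cons_of_ne (Ne.symm htx)] at hm; exact hm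
        · rw [if_neg hk, key]
          constructor
          · rintro (h1 | ⟨rfl, hm⟩ | ⟨h2, hne, hm⟩)
            · exact Or.inl h1
            · refine Or.inr (Or.inr ⟨List.mem_cons_self, hxa, ?_⟩)
              rw [List.count_cons_self]; push_cast at hm ⊢; omega
            · have htna : t ≠ a := fun h => hanotin (h ▸ h2)
              refine Or.inr (Or.inr ⟨List.mem_cons_of_mem _ h2, htna, ?_⟩)
              rw [List.count_cons_of_ne (Ne.symm hne)]; exact hm
          · rintro (h1 | ⟨rfl, hm⟩ | ⟨h2, hne, hm⟩)
            · exact Or.inl h1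
            · rw [hcnt0'] at hm; push_cast at hm; omega
            · rcases List.mem_cons.1 h2 with rfl | h2'
              · refine Or.inr (Or.inl ⟨rfl, ?_⟩)
                rw [List.count_cons_self] at hm; push_cast at hm ⊢; omega
              · by_cases htx : t = x
                · subst htx
                  refine Or.inr (Or.inl ⟨rfl, ?_⟩)
                  rw [List.count_cons_self] at hm; push_cast at hm ⊢; omega
                · refine Or.inr (Or.inr ⟨h2', htx, ?_⟩)
                  rw [List.count_cons_of_ne (Ne.symm htx)] at hm; exact hm

-- the sweep from the initial state collects exactly the labels with count ≥ m
theorem pv_sweep (m : Int) (xs : List String) (hs : xs.Pairwise (· ≤ ·)) (t : String) :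
    (t ∈ pvFinish m (xs.foldl (pvStep m) (none, 0, PySem.Set.empty))) ↔
      t ∈ xs ∧ m ≤ (xs.count t : Int) := by
  cases xs with
  | nil => simp [pvFinish, PySem.Set.empty]
  | cons x xs =>
      have hxle : ∀ y ∈ xs, x ≤ y := fun y hy => List.rel_of_pairwise_cons hs hy
      have hst : pvStep m (none, 0, PySem.Set.empty) x = (some x, 1, PySem.Set.empty) := by
        simp [pvStep]
      rw [List.foldl_cons, hst,
        pv_sweep_inv m xs hs.of_cons x 1 PySem.Set.empty hxle]
      constructor
      · rintro (h1 | ⟨rfl, hm⟩ | ⟨h2, hne, hm⟩)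
        · simp [PySem.Set.empty] at h1
        · exact ⟨List.mem_cons_self,
            by rw [List.count_cons_self]; push_cast at hm ⊢; omega⟩
        · exact ⟨List.mem_cons_of_mem _ h2,
            by rw [List.count_cons_of_ne (Ne.symm hne)]; exact hm⟩
      · rintro ⟨h2, hm⟩
        rcases List.mem_cons.1 h2 with rfl | h2'
        · refine Or.inr (Or.inl ⟨rfl, ?_⟩)
          rw [List.count_cons_self] at hm; push_cast at hm ⊢; omega
        · by_cases htx : t = x
          · subst htx
            refine Or.inr (Or.inl ⟨rfl, ?_⟩)
            rw [List.count_cons_self] at hm; push_cast at hm ⊢; omega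
          · refine Or.inr (Or.inr ⟨h2', htx, ?_⟩)
            rw [List.count_cons_of_ne (Ne.symm htx)] at hm; exact hm

theorem pv_main (labels : List (List String)) (min_doc_count : Int) :
    truncate_labels labels min_doc_count = truncate_labels_alt labels min_doc_count := by
  unfold truncate_labels truncate_labels_alt
  by_cases h : min_doc_count = 0
  · simp [h]
  · simp only [if_neg h]
    rw [pv_step_eq, pv_dict_eq, PySem.List.foldl_append_singleton_eq_map, List.nil_append]
    have hflat : labels.flatMap (fun row => row) = labels.flatten := by
      simp [List.flatMap_def]
    rw [hflat]
    set flat := PySem.List.sorted labels.flatten (fun x => x) false with hflatdef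
    have hperm : flat.Perm labels.flatten := PySem.List.sorted_perm _ _ _
    have hsorted : flat.Pairwise (· ≤ ·) := PySem.List.sorted_pairwise _ _
    refine List.map_congr_left ?_
    intro row hrow
    refine List.filter_congr ?_
    intro label hlab
    have hmemflat : label ∈ labels.flatten := List.mem_flatten.2 ⟨row, hrow, hlab⟩
    rw [pv_good_mem labels.flatten min_doc_count label hmemflat]
    have : (PySem.Set.contains (pvFinish min_doc_count
        (flat.foldl (pvStep min_doc_count) (none, 0, PySem.Set.empty))) label) =
        decide (label ∈ flat ∧ min_doc_count ≤ (flat.count label : Int)) := by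
      rw [Bool.eq_iff_iff]
      simp only [PySem.Set.contains_iff, decide_eq_true_eq]
      exact pv_sweep min_doc_count flat hsorted label
    rw [this, hperm.count_eq]
    simp [hperm.mem_iff.2 hmemflat]

-- ===== VERDICT (by name: the statement is the Claim_ definition above) =====
theorem truncate_labels_spec : Claim_equal_truncate_labels := by
  intro labels min_doc_count _
  unfold Spec_truncate_labels
  exact pv_main labels min_doc_count
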